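-- pv_equiv track=rewrite | github.com/dmeiser/flexible-mcp-crawl4ai-rag | src/services/web_crawler.py | _collect_overlap_sentences
-- ===== SOURCE A (Python) =====
-- from typing import Any, Callable, Dict, List, Optional
--
-- def _collect_overlap_sentences(current: List[str], overlap: int) -> List[str]:
--     if overlap <= 0:
--         return []
--     overlap_sents: List[str] = []
--     overlap_len = 0
--     for sentence in reversed(current):
--         if overlap_len + len(sentence) > overlap:
--             break
--         overlap_sents.insert(0, sentence)
--         overlap_len += len(sentence) + 1
--     return overlap_sents
-- ===== SOURCE B (Python) =====
-- def _collect_overlap_sentences(current, overlap):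
--     # Cumulative-cost table over the reversed list, then count + slice.
--     if overlap <= 0:
--         return []
--     sums = []
--     total = 0
--     for s in reversed(current):
--         total += len(s) + 1
--         sums.append(total)
--     count = sum(1 for t in sums if t <= overlap + 1)
--     return current[len(current) - count:]
-- ===== Notes on version B (the rewrite author's own statement) =====
-- stated objective: alternative
-- what changed: Replaces the incremental prepend-and-break greedy loop (list.insert(0,...) prepends) with a cumulative cost table over the reversed list, a monotone count of entries within overlap+1, and a single tail slice of the input.
import Mathlib
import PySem

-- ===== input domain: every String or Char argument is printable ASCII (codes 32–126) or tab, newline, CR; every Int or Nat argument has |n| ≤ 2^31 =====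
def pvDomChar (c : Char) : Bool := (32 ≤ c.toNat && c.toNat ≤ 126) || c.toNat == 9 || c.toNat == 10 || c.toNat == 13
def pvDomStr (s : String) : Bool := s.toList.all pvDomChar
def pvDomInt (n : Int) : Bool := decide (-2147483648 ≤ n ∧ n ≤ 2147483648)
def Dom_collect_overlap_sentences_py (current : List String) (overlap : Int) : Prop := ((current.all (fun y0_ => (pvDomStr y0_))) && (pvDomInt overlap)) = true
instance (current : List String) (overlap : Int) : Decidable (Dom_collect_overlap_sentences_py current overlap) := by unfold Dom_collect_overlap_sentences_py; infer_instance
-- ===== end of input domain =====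

-- B replaces A's prepend-and-break greedy loop with a cumulative-cost table, a count, and one tail slice (alternative decomposition, same cost).

-- ===== PORT A =====
-- the for-loop over reversed(current): state is overlap_len; 'insert(0, sentence)'
-- means the recursive result for the rest is followed by this sentence; 'break' returns [].
def pvGoA (overlap : Int) : List String → Int → List String
  | [], _ => []
  | s :: rest, olen =>
    if olen + PySem.Str.len s > overlap then []
    else pvGoA overlap rest (olen + PySem.Str.len s + 1) ++ [s]

def collect_overlap_sentences_py (current : List String) (overlap : Int) : List String :=
  if overlap ≤ 0 then [] else pvGoA overlap current.reverse 0

-- ===== PORT B =====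
-- the sums-building loop of Source B (running total of len(s)+1 over reversed(current))
def pvSumsB : List String → Int → List Int
  | [], _ => []
  | s :: rest, total =>
    let t := total + PySem.Str.len s + 1
    t :: pvSumsB rest t

def collect_overlap_sentences_py_alt (current : List String) (overlap : Int) : List String :=
  if overlap ≤ 0 then []
  else
    let sums := pvSumsB current.reverse 0
    let count := sums.countP (fun t => t ≤ overlap + 1)
    current.drop (current.length - count)   -- current[len(current)-count:], count ≤ len

-- ===== PRECONDITION & SPEC =====
def Spec_collect_overlap_sentences_py (current : List String) (overlap : Int) (out : List String) : Prop := out = collect_overlap_sentences_py_alt current overlap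
instance (current : List String) (overlap : Int) (out : List String) : Decidable (Spec_collect_overlap_sentences_py current overlap out) := by unfold Spec_collect_overlap_sentences_py; infer_instance

-- ===== CLAIM (what is proved, stated in full; the proofs are below) =====
def Claim_equal_collect_overlap_sentences_py : Prop := ∀ (current : List String) (overlap : Int), Dom_collect_overlap_sentences_py current overlap → Spec_collect_overlap_sentences_py current overlap (collect_overlap_sentences_py current overlap)

-- ===== LEMMAS AND PROOFS =====

-- every entry of the cumulative-sum table strictly exceeds the starting total
theorem pvSumsB_gt (l : List String) (total : Int) :
    ∀ x ∈ pvSumsB l total, total < x := by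
  induction l generalizing total with
  | nil => simp [pvSumsB]
  | cons s rest ih =>
    intro x hx
    simp only [pvSumsB, List.mem_cons] at hx
    have hlen : 0 ≤ PySem.Str.len s := by
      simp [PySem.Str.len]
    rcases hx with h | h
    · omega
    · have := ih (total + PySem.Str.len s + 1) x h
      omega

-- A's greedy loop equals reversing the counted prefix of the reversed list
theorem pvGoA_eq_take (overlap : Int) (l : List String) (olen : Int) :
    pvGoA overlap l olen =
      (l.take ((pvSumsB l olen).countP (fun t => t ≤ overlap + 1))).reverse := by
  induction l generalizing olen with
  | nil => simp [pvGoA, pvSumsB]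
  | cons s rest ih =>
    by_cases h : olen + PySem.Str.len s > overlap
    · have hall : (pvSumsB (s :: rest) olen).countP (fun t => t ≤ overlap + 1) = 0 := by
        rw [List.countP_eq_zero]
        intro x hx
        simp only [pvSumsB, List.mem_cons] at hx
        simp only [decide_eq_true_eq]
        rcases hx with hx | hx
        · omega
        · have := pvSumsB_gt rest (olen + PySem.Str.len s + 1) x hx
          omega
      simp only [pvGoA, if_pos h, hall, List.take_zero, List.reverse_nil]
    · have hle : olen + PySem.Str.len s + 1 ≤ overlap + 1 := by omega
      simp only [pvGoA, if_neg h, pvSumsB, List.countP_cons, decide_eq_true_eq, if_pos hle]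
      rw [ih]
      simp [List.take_succ_cons]

theorem collect_overlap_sentences_py_eq (current : List String) (overlap : Int) :
    collect_overlap_sentences_py current overlap = collect_overlap_sentences_py_alt current overlap := by
  unfold collect_overlap_sentences_py collect_overlap_sentences_py_alt
  by_cases h : overlap ≤ 0
  · simp [h]
  · simp only [if_neg h]
    rw [pvGoA_eq_take]
    rw [List.reverse_take, List.reverse_reverse, List.length_reverse]

-- ===== VERDICT (by name: the statement is the Claim_ definition above) =====
theorem collect_overlap_sentences_py_spec : Claim_equal_collect_overlap_sentences_py := by
  intro current overlap _
  unfold Spec_collect_overlap_sentences_py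
  exact collect_overlap_sentences_py_eq current overlap
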